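-- pv_equiv track=rewrite | github.com/Dmitry273/adventofcode | Day12/Day12-2Sol.py | poten
-- ===== SOURCE A (Python) =====
-- import itertools
--
-- def poten(s: str, nums: list) -> bool:
--     ss = s
--     if '?' in s: ss = s[:s.index('?')]
--     local = []
--     for key, group in itertools.groupby(ss, key= lambda x: x =='#'):
--         if key: local.append(len(list(group)))
--     if local == []: return True
--
--     if len(local) > len(nums): return False
--     for i in range(len(local)-1):
--         if local[i] != nums[i]: return False
--     if ('?' not in s or ss[-1]=='.') and local[len(local)-1] != nums[len(local)-1]: return False
--     if local[len(local)-1] > nums[len(local)-1]: return False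
--     return True
-- ===== SOURCE B (Python) =====
-- def poten(s: str, nums: list) -> bool:
--     q = s.find('?')
--     ss = s if q < 0 else s[:q]
--     rem = nums
--     run = 0
--     pending = None          # last closed-but-unchecked group
--     for c in ss:
--         if c == '#':
--             run += 1
--         elif run:
--             if pending is not None:
--                 if not rem or pending != rem[0]:
--                     return False
--                 rem = rem[1:]
--             pending = run
--             run = 0
--     if run:
--         if pending is not None:
--             if not rem or pending != rem[0]:
--                 return False
--             rem = rem[1:]
--         pending = run
--     if pending is None:
--         return True
--     if not rem:
--         return False
--     exact = q < 0 or ss[-1] == '.'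
--     if exact and pending != rem[0]:
--         return False
--     return pending <= rem[0]
-- ===== Notes on version B (the rewrite author's own statement) =====
-- stated objective: simpler
-- what changed: A materialises the full list of '#'-run lengths with itertools.groupby and then compares it to nums with index arithmetic and range loops; B makes one left-to-right scan over the prefix, checking each closed run against the remaining counts as it goes and returning False early, with only the possibly-open final run handled after the loop.
import Mathlib
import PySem

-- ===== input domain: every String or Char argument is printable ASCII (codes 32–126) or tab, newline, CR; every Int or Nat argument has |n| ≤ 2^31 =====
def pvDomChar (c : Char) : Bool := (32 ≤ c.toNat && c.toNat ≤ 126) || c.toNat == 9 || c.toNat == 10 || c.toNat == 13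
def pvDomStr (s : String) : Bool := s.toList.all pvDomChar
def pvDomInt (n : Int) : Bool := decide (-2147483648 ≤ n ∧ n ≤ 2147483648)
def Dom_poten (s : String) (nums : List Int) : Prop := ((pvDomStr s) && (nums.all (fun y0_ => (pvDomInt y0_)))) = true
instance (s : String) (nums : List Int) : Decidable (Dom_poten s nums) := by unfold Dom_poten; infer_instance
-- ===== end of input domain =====

-- B replaces A's groupby-then-compare with a single left-to-right scan that checks each
-- closed '#'-run against the expected counts as it goes (objective: simpler one-pass decomposition).

-- ===== PORT A =====
-- itertools.groupby filtered on key (x == '#'): the lengths of the maximal '#'-runs,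
-- carrying the length `run` of the current open run.
def pvGroupsA : Int → List Char → List Int
  | run, [] => if run ≠ 0 then [run] else []
  | run, c :: cs =>
    if c = '#' then pvGroupsA (run + 1) cs
    else if run ≠ 0 then run :: pvGroupsA 0 cs
    else pvGroupsA 0 cs

def poten (s : String) (nums : List Int) : Bool :=
  let cs := s.toList
  -- ss = s[:s.index('?')] if '?' in s else s
  let ss := if cs.contains '?' then cs.takeWhile (· ≠ '?') else cs
  let loc := pvGroupsA 0 ss
  if loc = [] then true
  else if loc.length > nums.length then false
  else if (List.range (loc.length - 1)).any
      (fun i => decide (loc.getD i 0 ≠ nums.getD i 0)) then false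
  else if ((!cs.contains '?' || PySem.List.pyGet? ss (-1) == some '.')
      && decide (loc.getD (loc.length - 1) 0 ≠ nums.getD (loc.length - 1) 0)) then false
  else if decide (loc.getD (loc.length - 1) 0 > nums.getD (loc.length - 1) 0) then false
  else true

-- ===== PORT B =====
-- one-pass scan: `rem` = counts not yet consumed, `run` = current open '#'-run,
-- `pending` = last closed but not yet checked run; none = early `return False`.
def pvScanB : List Char → List Int → Int → Option Int → Option (List Int × Int × Option Int)
  | [], rem, run, pending => some (rem, run, pending)
  | c :: cs, rem, run, pending =>
    if c = '#' then pvScanB cs rem (run + 1) pending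
    else if run ≠ 0 then
      match pending with
      | some p =>
        match rem with
        | [] => none
        | n :: rs => if p ≠ n then none else pvScanB cs rs 0 (some run)
      | none => pvScanB cs rem 0 (some run)
    else pvScanB cs rem run pending

-- the code after the loop in Source B
def pvFinishB (exact : Bool) (rem : List Int) (run : Int) (pending : Option Int) : Bool :=
  let st2 : Option (List Int × Option Int) :=
    if run ≠ 0 then
      match pending with
      | some p =>
        match rem with
        | [] => none
        | n :: rs => if p ≠ n then none else some (rs, some run)
      | none => some (rem, some run)
    else some (rem, pending)
  match st2 with
  | none => false
  | some (rem2, pending2) =>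
    match pending2 with
    | none => true
    | some g =>
      match rem2 with
      | [] => false
      | n :: _ =>
        if exact && decide (g ≠ n) then false else decide (g ≤ n)

def poten_alt (s : String) (nums : List Int) : Bool :=
  let cs := s.toList
  let q := cs.contains '?'
  let ss := if q then cs.takeWhile (· ≠ '?') else cs
  match pvScanB ss nums 0 none with
  | none => false
  | some (rem, run, pending) =>
      pvFinishB (!q || PySem.List.pyGet? ss (-1) == some '.') rem run pending

-- ===== PRECONDITION & SPEC =====
def Spec_poten (s : String) (nums : List Int) (out : Bool) : Prop := out = poten_alt s nums
instance (s : String) (nums : List Int) (out : Bool) : Decidable (Spec_poten s nums out) := by unfold Spec_poten; infer_instance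

-- ===== CLAIM (what is proved, stated in full; the proofs are below) =====
def Claim_equal_poten : Prop := ∀ (s : String) (nums : List Int), Dom_poten s nums → Spec_poten s nums (poten s nums)

-- ===== LEMMAS AND PROOFS =====

-- common reference: check a group list against the counts, `exact` = final group must match exactly
def chk (exact : Bool) : List Int → List Int → Bool
  | [], _ => true
  | _ :: _, [] => false
  | [g], n :: _ => if exact && decide (g ≠ n) then false else decide (g ≤ n)
  | g :: r :: rs, n :: ns => if g ≠ n then false else chk exact (r :: rs) ns

-- A's post-groupby body
def abody (exact : Bool) (loc nums : List Int) : Bool :=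
  if loc = [] then true
  else if loc.length > nums.length then false
  else if (List.range (loc.length - 1)).any
      (fun i => decide (loc.getD i 0 ≠ nums.getD i 0)) then false
  else if (exact && decide (loc.getD (loc.length - 1) 0 ≠ nums.getD (loc.length - 1) 0)) then false
  else if decide (loc.getD (loc.length - 1) 0 > nums.getD (loc.length - 1) 0) then false
  else true

theorem abody_eq_chk (exact : Bool) (loc nums : List Int) :
    abody exact loc nums = chk exact loc nums := by
  induction loc generalizing nums with
  | nil => simp [abody, chk]
  | cons g rest ih =>
    cases rest with
    | nil =>
      cases nums with
      | nil => simp [abody, chk]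
      | cons n ns =>
        simp only [abody, chk, List.length_cons, List.length_nil]
        simp
        congr 1
        simp only [← decide_not, decide_eq_decide]
        omega
    | cons r rs =>
      cases nums with
      | nil => simp [abody, chk]
      | cons n ns =>
        rw [chk, ← ih ns]
        simp only [abody, List.length_cons, Nat.add_sub_cancel, List.range_succ_eq_map,
          List.any_cons, List.any_map, Function.comp_def, List.getD_cons_zero,
          List.getD_cons_succ, reduceCtorEq]
        by_cases hg : g = n
        · simp [hg]
        · simp [hg]

theorem scan_eq_chk (exact : Bool) (cs : List Char) (rem : List Int) (run : Int) (pending : Option Int) :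
    (match pvScanB cs rem run pending with
     | none => false
     | some (r, ru, p) => pvFinishB exact r ru p)
    = chk exact ((pending.toList) ++ pvGroupsA run cs) rem := by
  induction cs generalizing rem run pending with
  | nil =>
    cases pending with
    | none =>
      by_cases h : run = 0 <;>
        simp [pvScanB, pvFinishB, pvGroupsA, h] <;> cases rem <;> simp [chk]
    | some p =>
      by_cases h : run = 0
      · subst h; cases rem <;> simp [pvScanB, pvFinishB, pvGroupsA, chk]
      · cases rem with
        | nil => simp [pvScanB, pvFinishB, pvGroupsA, h, chk]
        | cons n rs =>
          by_cases hp : p = n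
          · cases rs with
            | nil => simp [pvScanB, pvFinishB, pvGroupsA, h, hp, chk]
            | cons m ms =>
              simp only [pvScanB, pvFinishB, pvGroupsA, hp]
              by_cases hm : run = m
              · subst hm; cases exact <;> simp [h, chk]
              · cases exact <;> simp [h, hm, chk]
          · simp [pvScanB, pvFinishB, pvGroupsA, h, hp, chk]
  | cons c cs ih =>
    by_cases hc : c = '#'
    · simp [pvScanB, pvGroupsA, hc, ih]
    · by_cases h : run = 0
      · simp [pvScanB, pvGroupsA, hc, h, ih]
      · cases pending with
        | none => simp [pvScanB, pvGroupsA, hc, h, ih]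
        | some p =>
          cases rem with
          | nil => simp [pvScanB, pvGroupsA, hc, h, chk]
          | cons n rs =>
            by_cases hp : p = n <;>
              simp [pvScanB, pvGroupsA, hc, h, hp, ih, chk]

-- ===== VERDICT (by name: the statement is the Claim_ definition above) =====
theorem poten_eq_aux (exact : Bool) (ss : List Char) (nums : List Int) :
    abody exact (pvGroupsA 0 ss) nums =
      (match pvScanB ss nums 0 none with
       | none => false
       | some (rem, run, pending) => pvFinishB exact rem run pending) := by
  rw [abody_eq_chk]
  exact (scan_eq_chk exact ss nums 0 none).symm

theorem poten_spec : Claim_equal_poten := by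
  intro s nums _
  show poten s nums = poten_alt s nums
  exact poten_eq_aux
    (!(s.toList.contains '?') || PySem.List.pyGet?
        (if s.toList.contains '?' then s.toList.takeWhile (· ≠ '?') else s.toList) (-1) == some '.')
    (if s.toList.contains '?' then s.toList.takeWhile (· ≠ '?') else s.toList) nums
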